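-- pv_equiv track=rewrite | github.com/jsato0807/kabu | kabu_oanda_csv.py | generate_currency_pairs
-- ===== SOURCE A (Python) =====
-- def generate_currency_pairs(currencies, base_currency='USD'):
--     """
--     通貨リストから通貨ペアを生成し、USDを基軸として
--     最小限の通貨ペアデータで他のペアも計算できるようにする関数。
--     """
--     pairs_to_download = []
--     pairs_to_calculate = []
--
--     # USD基軸の通貨ペアを生成してダウンロードリストに追加
--     for currency in currencies:
--         if currency != base_currency:
--             pair = currency + base_currency + '=X'
--             pairs_to_download.append(pair)
--
--     # 基軸通貨を使って構成できるペアを計算リストに追加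
--     for i in range(len(currencies)):
--         for j in range(len(currencies)):
--             if i != j:
--                 pair = currencies[i] + currencies[j] + '=X'
--
--                 # 基軸通貨が含まれないペアを計算リストに追加
--                 if base_currency not in [currencies[i], currencies[j]]:
--                     pairs_to_calculate.append(pair)
--
--     return pairs_to_download, pairs_to_calculate
-- ===== SOURCE B (Python) =====
-- def generate_currency_pairs(currencies, base_currency='USD'):
--     """
--     Same result as the original, but the base-currency filter is applied once
--     up front; the calculate list is then built by walking the filtered list
--     with a seen/rest split instead of index-pair loops with per-pair guards.
--     """
--     non_base = [c for c in currencies if c != base_currency]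
--     pairs_to_download = [c + base_currency + '=X' for c in non_base]
--     pairs_to_calculate = []
--     seen = []
--     rest = list(non_base)
--     while rest:
--         a = rest.pop(0)
--         for b in seen + rest:
--             pairs_to_calculate.append(a + b + '=X')
--         seen.append(a)
--     return pairs_to_download, pairs_to_calculate
-- ===== Notes on version B (the rewrite author's own statement) =====
-- stated objective: simpler
-- what changed: The base-currency filter is hoisted into a single non_base pre-filter; the download list becomes a plain comprehension over it, and the calculate list is built by a seen/rest walk over non_base (pairing each element with all others) instead of nested index loops with a per-pair membership guard.
import Mathlib
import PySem

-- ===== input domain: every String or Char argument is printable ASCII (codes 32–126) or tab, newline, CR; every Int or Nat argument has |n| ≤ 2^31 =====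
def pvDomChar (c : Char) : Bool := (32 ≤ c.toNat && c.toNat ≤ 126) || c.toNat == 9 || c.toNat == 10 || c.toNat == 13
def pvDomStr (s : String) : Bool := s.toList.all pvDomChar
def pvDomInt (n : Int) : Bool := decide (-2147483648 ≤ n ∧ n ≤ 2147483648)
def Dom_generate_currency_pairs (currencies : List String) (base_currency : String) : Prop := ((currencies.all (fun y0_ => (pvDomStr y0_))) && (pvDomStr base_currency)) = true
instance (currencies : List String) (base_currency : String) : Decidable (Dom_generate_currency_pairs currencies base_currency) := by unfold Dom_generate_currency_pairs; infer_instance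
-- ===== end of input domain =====

-- B hoists the base-currency filter out once and builds the calculate list by a
-- seen/rest walk over the filtered list instead of nested index loops (objective: simpler).

-- ===== PORT A =====
def generate_currency_pairs (currencies : List String) (base_currency : String) : List String × List String :=
  -- first loop: download pairs
  let pairs_to_download : List String :=
    currencies.foldl (fun acc currency =>
      if currency ≠ base_currency then acc ++ [currency ++ base_currency ++ "=X"] else acc) []
  -- nested index loops: calculate pairs
  let n : Int := (currencies.length : Int)
  let pairs_to_calculate : List String :=
    (PySem.List.pyRange 0 n 1).foldl (fun acc i =>
      (PySem.List.pyRange 0 n 1).foldl (fun acc j =>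
        if i ≠ j then
          let ci := PySem.List.pyGetD currencies i ""
          let cj := PySem.List.pyGetD currencies j ""
          if ¬ (base_currency = ci ∨ base_currency = cj) then acc ++ [ci ++ cj ++ "=X"] else acc
        else acc) acc) []
  (pairs_to_download, pairs_to_calculate)

-- ===== PORT B =====
-- the 'while rest: a = rest.pop(0); for b in seen + rest: append; seen.append(a)' loop
def gcpCalcLoop (base_currency : String) (seen acc : List String) : List String → List String
  | [] => acc
  | a :: rest =>
      gcpCalcLoop base_currency (seen ++ [a])
        ((seen ++ rest).foldl (fun ac b => ac ++ [a ++ b ++ "=X"]) acc) rest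

def generate_currency_pairs_alt (currencies : List String) (base_currency : String) : List String × List String :=
  let non_base : List String := currencies.filter (fun c => c ≠ base_currency)
  let pairs_to_download : List String := non_base.map (fun c => c ++ base_currency ++ "=X")
  let pairs_to_calculate : List String := gcpCalcLoop base_currency [] [] non_base
  (pairs_to_download, pairs_to_calculate)

-- ===== PRECONDITION & SPEC =====
def Spec_generate_currency_pairs (currencies : List String) (base_currency : String) (out : List String × List String) : Prop := out = generate_currency_pairs_alt currencies base_currency
instance (currencies : List String) (base_currency : String) (out : List String × List String) : Decidable (Spec_generate_currency_pairs currencies base_currency out) := by unfold Spec_generate_currency_pairs; infer_instance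

-- ===== CLAIM (what is proved, stated in full; the proofs are below) =====
def Claim_equal_generate_currency_pairs : Prop := ∀ (currencies : List String) (base_currency : String), Dom_generate_currency_pairs currencies base_currency → Spec_generate_currency_pairs currencies base_currency (generate_currency_pairs currencies base_currency)

-- ===== LEMMAS AND PROOFS =====

-- accumulator-free form of B's loop
def gcpFlat (base_currency : String) (seen : List String) : List String → List String
  | [] => []
  | a :: rest => (seen ++ rest).map (fun b => a ++ b ++ "=X") ++ gcpFlat base_currency (seen ++ [a]) rest

theorem gcpCalcLoop_eq (base : String) :
    ∀ (todo seen acc : List String),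
      gcpCalcLoop base seen acc todo = acc ++ gcpFlat base seen todo := by
  intro todo
  induction todo with
  | nil => intro seen acc; simp [gcpCalcLoop, gcpFlat]
  | cons a rest ih =>
      intro seen acc
      simp only [gcpCalcLoop, gcpFlat]
      rw [PySem.List.foldl_append_singleton_eq_map, ih]
      simp

-- core: pairwise-distinct-first-component list, all-ordered-pairs flatMap = seen/rest walk
theorem gcpMain (base : String) :
    ∀ (todo done : List (Int × String)),
      (done ++ todo).Pairwise (fun p q => p.1 ≠ q.1) →
      todo.flatMap (fun p =>
        ((done ++ todo).filter (fun q => decide (q.1 ≠ p.1))).map (fun q => p.2 ++ q.2 ++ "=X"))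
      = gcpFlat base (done.map (fun p => p.2)) (todo.map (fun p => p.2)) := by
  intro todo
  induction todo with
  | nil => intro done h; simp [gcpFlat]
  | cons p rest ih =>
      intro done h
      have hdone : ∀ q ∈ done, q.1 ≠ p.1 := by
        intro q hq
        have := (List.pairwise_append.mp h).2.2 q hq p (by simp)
        exact this
      have hrest : ∀ q ∈ rest, q.1 ≠ p.1 := by
        have h2 := (List.pairwise_append.mp h).2.1
        intro q hq
        exact fun e => (List.pairwise_cons.mp h2).1 q hq e.symm
      have hfilt : (done ++ p :: rest).filter (fun q => decide (q.1 ≠ p.1)) = done ++ rest := by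
        rw [List.filter_append]
        have h1 : done.filter (fun q => decide (q.1 ≠ p.1)) = done :=
          List.filter_eq_self.mpr (fun q hq => by simpa using hdone q hq)
        have h2 : (p :: rest).filter (fun q => decide (q.1 ≠ p.1)) = rest := by
          simp only [List.filter_cons]
          simp only [decide_eq_true_eq]
          rw [if_neg (by simp)]
          exact List.filter_eq_self.mpr (fun q hq => by simpa using hrest q hq)
        rw [h1, h2]
      have hassoc : done ++ p :: rest = (done ++ [p]) ++ rest := by simp
      have ihx := ih (done ++ [p]) (by rw [← hassoc]; exact h)
      simp only [List.flatMap_cons]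
      rw [hfilt, hassoc, ihx]
      simp only [List.map_cons, List.map_append, gcpFlat, List.map_map]
      rfl

-- flatMap with an if-else-[] body is the flatMap over the filter
theorem flatMap_ite_nil {α β : Type} (P : α → Prop) [DecidablePred P]
    (g : α → List β) (l : List α) :
    l.flatMap (fun x => if P x then g x else []) = (l.filter (fun x => decide (P x))).flatMap g := by
  induction l with
  | nil => simp
  | cons x xs ih =>
      by_cases hx : P x <;> simp [hx, ih]

-- inner j-loop of A, for a fixed i, as a filter+map over the enumerated list
theorem gcpInner (currencies : List String) (base : String) (i : Int) (acc : List String) :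
    (PySem.List.pyRange 0 (currencies.length : Int) 1).foldl (fun acc j =>
        if i ≠ j then
          if ¬ (base = PySem.List.pyGetD currencies i "" ∨ base = PySem.List.pyGetD currencies j "")
          then acc ++ [PySem.List.pyGetD currencies i "" ++ PySem.List.pyGetD currencies j "" ++ "=X"]
          else acc
        else acc) acc
    = acc ++ ((PySem.List.enumerate currencies 0).filter
        (fun q => decide (i ≠ q.1 ∧ ¬ (base = PySem.List.pyGetD currencies i "" ∨ base = q.2)))).map
        (fun q => PySem.List.pyGetD currencies i "" ++ q.2 ++ "=X") := by
  have hbody : ∀ (acc : List String), ∀ j ∈ PySem.List.pyRange 0 (currencies.length : Int) 1,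
      (if i ≠ j then
        if ¬ (base = PySem.List.pyGetD currencies i "" ∨ base = PySem.List.pyGetD currencies j "")
        then acc ++ [PySem.List.pyGetD currencies i "" ++ PySem.List.pyGetD currencies j "" ++ "=X"]
        else acc
      else acc)
      = (if (fun j => decide (i ≠ j ∧ ¬ (base = PySem.List.pyGetD currencies i ""
              ∨ base = PySem.List.pyGetD currencies j ""))) j = true
         then acc ++ [PySem.List.pyGetD currencies i "" ++ PySem.List.pyGetD currencies j "" ++ "=X"]
         else acc) := by
    intro acc j _
    by_cases h1 : i ≠ j <;>
      by_cases h2 : ¬ (base = PySem.List.pyGetD currencies i "" ∨ base = PySem.List.pyGetD currencies j "") <;>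
      simp [h1, h2]
  rw [PySem.List.foldl_congr_mem _ _ _ _ hbody, PySem.List.foldl_append_if]
  rw [PySem.List.enumerate_eq_map_pyRange currencies "", List.filter_map, List.map_map]
  simp [Function.comp_def]

-- the whole calculate loop of A equals B's loop on the filtered list
theorem gcpCalcA (currencies : List String) (base : String) :
    (PySem.List.pyRange 0 (currencies.length : Int) 1).foldl (fun acc i =>
      (PySem.List.pyRange 0 (currencies.length : Int) 1).foldl (fun acc j =>
        if i ≠ j then
          if ¬ (base = PySem.List.pyGetD currencies i "" ∨ base = PySem.List.pyGetD currencies j "")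
          then acc ++ [PySem.List.pyGetD currencies i "" ++ PySem.List.pyGetD currencies j "" ++ "=X"]
          else acc
        else acc) acc) []
    = gcpCalcLoop base [] [] (currencies.filter (fun c => c ≠ base)) := by
  -- notation
  set E := PySem.List.enumerate currencies 0 with hE
  set F := E.filter (fun p => decide (p.2 ≠ base)) with hF
  -- outer loop: rewrite each inner loop, then pull the fold over the range onto E
  have houter : ∀ (acc : List String), ∀ i ∈ PySem.List.pyRange 0 (currencies.length : Int) 1,
      ((PySem.List.pyRange 0 (currencies.length : Int) 1).foldl (fun acc j =>
        if i ≠ j then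
          if ¬ (base = PySem.List.pyGetD currencies i "" ∨ base = PySem.List.pyGetD currencies j "")
          then acc ++ [PySem.List.pyGetD currencies i "" ++ PySem.List.pyGetD currencies j "" ++ "=X"]
          else acc
        else acc) acc)
      = acc ++ ((fun p => (E.filter
            (fun q => decide (p.1 ≠ q.1 ∧ ¬ (base = p.2 ∨ base = q.2)))).map
            (fun q => p.2 ++ q.2 ++ "=X")) ((fun j => (j, PySem.List.pyGetD currencies j "")) i)) := by
    intro acc i _
    exact gcpInner currencies base i acc
  rw [PySem.List.foldl_congr_mem _ _ _ _ houter]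
  have hfold : (PySem.List.pyRange 0 (currencies.length : Int) 1).foldl
      (fun acc i => acc ++ ((fun p => (E.filter
            (fun q => decide (p.1 ≠ q.1 ∧ ¬ (base = p.2 ∨ base = q.2)))).map
            (fun q => p.2 ++ q.2 ++ "=X")) ((fun j => (j, PySem.List.pyGetD currencies j "")) i))) []
      = E.foldl (fun acc p => acc ++ (E.filter
            (fun q => decide (p.1 ≠ q.1 ∧ ¬ (base = p.2 ∨ base = q.2)))).map
            (fun q => p.2 ++ q.2 ++ "=X")) [] := by
    rw [hE, PySem.List.enumerate_eq_map_pyRange currencies "", List.foldl_map]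
    simp only [PySem.List.len]
  rw [hfold, PySem.List.foldl_append_eq_flatMap]
  -- pointwise: base-valued outer entries contribute nothing; rest filter over F
  have hpt : ∀ p : Int × String,
      (E.filter (fun q => decide (p.1 ≠ q.1 ∧ ¬ (base = p.2 ∨ base = q.2)))).map
        (fun q => p.2 ++ q.2 ++ "=X")
      = (if p.2 ≠ base then ((F.filter (fun q => decide (q.1 ≠ p.1))).map
          (fun q => p.2 ++ q.2 ++ "=X")) else []) := by
    intro p
    by_cases hp : p.2 = base
    · have hnil : E.filter (fun q => decide (p.1 ≠ q.1 ∧ ¬ (base = p.2 ∨ base = q.2))) = [] := by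
        apply List.filter_eq_nil_iff.mpr
        intro q _
        simp [hp]
      simp [hp]
    · rw [if_pos hp]
      congr 1
      rw [hF, List.filter_filter]
      apply List.filter_congr
      intro q _
      simp only [← Bool.decide_and]
      congr 1
      apply propext
      simp only [not_or]
      constructor
      · rintro ⟨h1, _, h3⟩
        exact ⟨Ne.symm h1, Ne.symm h3⟩
      · rintro ⟨h1, h2⟩
        exact ⟨Ne.symm h1, Ne.symm hp, Ne.symm h2⟩
  have hflat : E.flatMap (fun p =>
      (E.filter (fun q => decide (p.1 ≠ q.1 ∧ ¬ (base = p.2 ∨ base = q.2)))).map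
        (fun q => p.2 ++ q.2 ++ "=X"))
      = E.flatMap (fun p => if p.2 ≠ base then ((F.filter (fun q => decide (q.1 ≠ p.1))).map
          (fun q => p.2 ++ q.2 ++ "=X")) else []) := by
    congr 1
    funext p
    exact hpt p
  rw [hflat, flatMap_ite_nil (fun p : Int × String => p.2 ≠ base)]
  -- now apply the core walk lemma with done = []
  have hpw : (([] : List (Int × String)) ++ F).Pairwise (fun p q => p.1 ≠ q.1) := by
    simp only [List.nil_append]
    exact ((PySem.List.pairwise_lt_enumerate currencies 0).filter _).imp (fun h => ne_of_lt h)
  have hmain := gcpMain base F [] hpw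
  simp only [List.nil_append, List.map_nil] at hmain
  rw [← hF, hmain]
  -- F.map snd is the filtered currency list
  have hsnd : F.map (fun p => p.2) = currencies.filter (fun c => c ≠ base) := by
    have : currencies.filter (fun c => decide (c ≠ base))
        = (E.map (fun p => p.2)).filter (fun c => decide (c ≠ base)) := by
      rw [hE, PySem.List.map_snd_enumerate]
    rw [show (currencies.filter (fun c => c ≠ base)) = currencies.filter (fun c => decide (c ≠ base)) from rfl,
        this, List.filter_map, hF]
    rfl
  rw [hsnd, gcpCalcLoop_eq, List.nil_append]

theorem generate_currency_pairs_agree (currencies : List String) (base : String) :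
    generate_currency_pairs currencies base = generate_currency_pairs_alt currencies base := by
  unfold generate_currency_pairs generate_currency_pairs_alt
  simp only []
  refine Prod.ext ?_ ?_
  · -- download lists
    show currencies.foldl
        (fun acc currency => if currency ≠ base then acc ++ [currency ++ base ++ "=X"] else acc) []
      = (currencies.filter (fun c => c ≠ base)).map (fun c => c ++ base ++ "=X")
    have hc : ∀ (acc : List String) (c : String), c ∈ currencies →
        (if c ≠ base then acc ++ [c ++ base ++ "=X"] else acc)
        = (if (decide (c ≠ base)) = true then acc ++ [c ++ base ++ "=X"] else acc) := by
      intro acc c _; simp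
    rw [PySem.List.foldl_congr_mem _ _ _ _ hc,
        PySem.List.foldl_append_if (fun c => decide (c ≠ base)) (fun c => c ++ base ++ "=X")]
    simp
  · -- calculate lists
    show (PySem.List.pyRange 0 (currencies.length : Int) 1).foldl (fun acc i =>
          (PySem.List.pyRange 0 (currencies.length : Int) 1).foldl (fun acc j =>
            if i ≠ j then
              let ci := PySem.List.pyGetD currencies i ""
              let cj := PySem.List.pyGetD currencies j ""
              if ¬ (base = ci ∨ base = cj) then acc ++ [ci ++ cj ++ "=X"] else acc
            else acc) acc) []
        = gcpCalcLoop base [] [] (currencies.filter (fun c => c ≠ base))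
    simp only []
    exact gcpCalcA currencies base

-- ===== VERDICT (by name: the statement is the Claim_ definition above) =====
theorem generate_currency_pairs_spec : Claim_equal_generate_currency_pairs := by
  intro currencies base _
  show _ = _
  exact generate_currency_pairs_agree currencies base
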